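-- pv_equiv track=rewrite | github.com/kaelan-the-G/ETL-AWS-Data-Pipeline | src/extract_load_transform/lambda_function.py | second_nf
-- ===== SOURCE A (Python) =====
-- def second_nf(dict_list):
--     try:
--         for dict in dict_list:
--             product = dict['order_details_string']
--             product_list = product.split('-')
--             product_name = '-'.join(product_list[0:-1]).strip()
--             product_price = product_list[-1].strip()
--             dict['product_name'] = product_name
--             dict['product_price'] = product_price
--             del dict['order_details_string']
--         return dict_list
--     except KeyError as e:
--         raise Exception(f"Key not found: {e}")
--     except ValueError as e:
--         raise Exception(f"Value error: {e}")
--     except Exception as e: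
--         raise Exception(f"An error occurred: {e}")
-- ===== SOURCE B (Python) =====
-- def second_nf(dict_list):
--     for d in dict_list:
--         name_acc = None
--         cur = []
--         for ch in d['order_details_string']:
--             if ch == '-':
--                 name_acc = cur if name_acc is None else name_acc + ['-'] + cur
--                 cur = []
--             else:
--                 cur.append(ch)
--         d['product_name'] = '' if name_acc is None else ''.join(name_acc).strip()
--         d['product_price'] = ''.join(cur).strip()
--         del d['order_details_string']
--     return dict_list
-- ===== Notes on version B (the rewrite author's own statement) =====
-- stated objective: alternative
-- what changed: Instead of splitting the string on '-' into a parts list and rejoining all-but-last, B makes a single character-level pass with two accumulators (name-so-far, current segment), folding each finished segment into the name whenever a dash is seen, so no parts list is ever built and no search for the last dash is done.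
import Mathlib
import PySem

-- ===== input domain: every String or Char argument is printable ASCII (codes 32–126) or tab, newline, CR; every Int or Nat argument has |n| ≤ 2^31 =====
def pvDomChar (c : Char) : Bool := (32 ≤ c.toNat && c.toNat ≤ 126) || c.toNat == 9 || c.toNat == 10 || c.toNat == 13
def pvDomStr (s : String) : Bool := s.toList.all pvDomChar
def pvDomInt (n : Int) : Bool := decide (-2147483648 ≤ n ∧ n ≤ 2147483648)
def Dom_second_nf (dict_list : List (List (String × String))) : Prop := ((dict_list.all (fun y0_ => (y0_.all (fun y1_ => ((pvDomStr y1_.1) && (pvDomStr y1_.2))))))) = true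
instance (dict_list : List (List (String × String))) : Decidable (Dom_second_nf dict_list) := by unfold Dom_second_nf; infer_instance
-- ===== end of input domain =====

-- B replaces split('-') + '-'.join(parts[:-1]) by ONE character-level pass with two accumulators
-- (name-so-far, current segment), folding each finished segment into the name at every dash;
-- return-value equivalence — both Pythons mutate the dicts in place.

-- ===== PORT A =====
-- one loop iteration of A: KeyError (missing 'order_details_string') = none
def second_nfStep (d : List (String × String)) : Option (List (String × String)) :=
  match (PySem.Dict.mk d).get? "order_details_string" with
  | none => none
  | some product =>
    let product_list := PySem.Chars.splitOn product.toList ['-']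
    let product_name := String.ofList (PySem.Chars.strip (PySem.Chars.join ['-'] (PySem.List.slice product_list (some 0) (some (-1)))))
    let product_price := String.ofList (PySem.Chars.strip (PySem.List.pyGetD product_list (-1) []))
    some (PySem.Dict.items (PySem.Dict.erase (PySem.Dict.insert (PySem.Dict.insert (PySem.Dict.mk d) "product_name" product_name) "product_price" product_price) "order_details_string"))

def second_nfLoop : List (List (String × String)) → Option (List (List (String × String)))
  | [] => some []
  | d :: rest =>
    match second_nfStep d with
    | none => none
    | some d' => (second_nfLoop rest).map (d' :: ·)

def second_nf (dict_list : List (List (String × String))) : List (List (String × String)) :=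
  (second_nfLoop dict_list).getD dict_list

-- ===== PORT B =====
-- python: `cur if name_acc is None else name_acc + ['-'] + cur`
def pvPrep (p : Option (List Char)) (cur : List Char) : List Char :=
  match p with
  | none => cur
  | some n => n ++ '-' :: cur

-- the body of B's inner `for ch in …` loop over state (name_acc, cur)
def pvF (st : Option (List Char) × List Char) (ch : Char) : Option (List Char) × List Char :=
  if ch = '-' then (some (pvPrep st.1 st.2), [])
  else (st.1, st.2 ++ [ch])

-- one loop iteration of B: single pass over the characters with accumulators
def second_nfAltStep (d : List (String × String)) : Option (List (String × String)) :=
  match (PySem.Dict.mk d).get? "order_details_string" with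
  | none => none
  | some product =>
    let st := product.toList.foldl pvF (none, [])
    let product_name : String :=
      match st.1 with
      | none => ""
      | some n => String.ofList (PySem.Chars.strip n)
    let product_price := String.ofList (PySem.Chars.strip st.2)
    some (PySem.Dict.items (PySem.Dict.erase (PySem.Dict.insert (PySem.Dict.insert (PySem.Dict.mk d) "product_name" product_name) "product_price" product_price) "order_details_string"))

def second_nfAltLoop : List (List (String × String)) → Option (List (List (String × String)))
  | [] => some []
  | d :: rest =>
    match second_nfAltStep d with
    | none => none
    | some d' => (second_nfAltLoop rest).map (d' :: ·)

def second_nf_alt (dict_list : List (List (String × String))) : List (List (String × String)) :=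
  (second_nfAltLoop dict_list).getD dict_list

-- ===== PRECONDITION & SPEC =====
-- Pre_ excludes exactly the inputs where some dict lacks the key 'order_details_string': there A raises Exception("Key not found: …").
def Pre_second_nf (dict_list : List (List (String × String))) : Prop :=
  ∀ d ∈ dict_list, (PySem.Dict.mk d).contains "order_details_string" = true
instance (dict_list : List (List (String × String))) : Decidable (Pre_second_nf dict_list) := by unfold Pre_second_nf; infer_instance

def pvWitness_second_nf : (List (List (String × String))) :=
  [[("order_details_string", "Gizmo - deluxe - 9.99"), ("id", "7")], [("order_details_string", "plain")]]

def Spec_second_nf (dict_list : List (List (String × String))) (out : List (List (String × String))) : Prop := out = second_nf_alt dict_list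
instance (dict_list : List (List (String × String))) (out : List (List (String × String))) : Decidable (Spec_second_nf dict_list out) := by unfold Spec_second_nf; infer_instance

-- ===== CLAIM (what is proved, stated in full; the proofs are below) =====
def Claim_equal_second_nf : Prop := ∀ (dict_list : List (List (String × String))), Dom_second_nf dict_list → Pre_second_nf dict_list → Spec_second_nf dict_list (second_nf dict_list)

-- ===== LEMMAS AND PROOFS =====

-- the segments of cs split on '-'
def pvS : List Char → List (List Char)
  | [] => [[]]
  | c :: rest => if c = '-' then [] :: pvS rest else List.modifyHead (c :: ·) (pvS rest)

theorem pv_splitOn_go (l : List Char) : ∀ (fuel : Nat) (cur : List Char) (acc : List (List Char)),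
    l.length < fuel →
    PySem.Chars.splitOn.go ['-'] fuel l cur acc = acc.reverse ++ List.modifyHead (cur.reverse ++ ·) (pvS l) := by
  induction l with
  | nil =>
    intro fuel cur acc h
    cases fuel with
    | zero => omega
    | succ f => simp [PySem.Chars.splitOn.go, pvS, List.modifyHead]
  | cons c rest ih =>
    intro fuel cur acc h
    cases fuel with
    | zero => omega
    | succ f =>
      by_cases hc : c = '-'
      · subst hc
        rw [show PySem.Chars.splitOn.go ['-'] (f+1) ('-' :: rest) cur acc
            = PySem.Chars.splitOn.go ['-'] f (List.drop 1 ('-'::rest)) [] (cur.reverse :: acc) by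
          simp [PySem.Chars.splitOn.go, List.isPrefixOf]]
        simp only [List.drop]
        rw [ih f [] (cur.reverse :: acc) (by simp at h ⊢; omega)]
        simp [pvS]
        cases hS : pvS rest <;> simp [List.modifyHead]
      · rw [show PySem.Chars.splitOn.go ['-'] (f+1) (c :: rest) cur acc
            = PySem.Chars.splitOn.go ['-'] f rest (c :: cur) acc by
          simp only [PySem.Chars.splitOn.go, List.isPrefixOf]
          rw [if_neg (by simp only [Bool.and_eq_true, beq_iff_eq]; intro hh; exact absurd hh.1.symm hc)]]
        rw [ih f (c :: cur) acc (by simp at h ⊢; omega)]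
        simp [pvS, hc]
        cases hS : pvS rest <;> simp [List.modifyHead]

theorem pvS_ne_nil (cs : List Char) : pvS cs ≠ [] := by
  induction cs with
  | nil => simp [pvS]
  | cons c rest ih =>
    simp only [pvS]
    split
    · simp
    · cases h : pvS rest with
      | nil => exact absurd h ih
      | cons a t => simp [List.modifyHead]

theorem pv_splitOn_eq_pvS (cs : List Char) : PySem.Chars.splitOn cs ['-'] = pvS cs := by
  unfold PySem.Chars.splitOn
  rw [pv_splitOn_go cs (cs.length + 1) [] [] (by omega)]
  cases h : pvS cs with
  | nil => exact absurd h (pvS_ne_nil cs)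
  | cons a t => simp [List.modifyHead]

theorem pv_getLast_eq_getLastD (l : List (List Char)) (h : l ≠ []) :
    l.getLast h = l.getLastD [] := by
  rw [List.getLastD_eq_getLast?, List.getLast?_eq_some_getLast h]
  rfl

theorem pv_getLastD_cons_of_ne_nil (a : List Char) (l : List (List Char)) (h : l ≠ []) :
    (a :: l).getLastD [] = l.getLastD [] := by
  rw [List.getLastD_eq_getLast?, List.getLastD_eq_getLast?,
    List.getLast?_eq_some_getLast (l := a :: l) (by simp),
    List.getLast?_eq_some_getLast (l := l) h]
  simp [List.getLast_cons h]

theorem pv_modifyHead_nil_append (l : List (List Char)) :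
    List.modifyHead (fun x => ([] : List Char) ++ x) l = l := by
  cases l <;> simp [List.modifyHead]

theorem pv_modifyHead_comp (cur : List Char) (c : Char) (l : List (List Char)) :
    List.modifyHead (fun x => (cur ++ [c]) ++ x) l
      = List.modifyHead (fun x => cur ++ x) (List.modifyHead (fun x => c :: x) l) := by
  cases l <;> simp [List.modifyHead]

-- the one-pass fold computes the joined all-but-last segments and the last segment
theorem pv_fold (cs : List Char) : ∀ (p : Option (List Char)) (cur : List Char),
    List.foldl pvF (p, cur) cs =
      ((if (pvS cs).length = 1 then p
        else some (pvPrep p (PySem.Chars.join ['-'] (List.modifyHead (fun x => cur ++ x) (pvS cs)).dropLast))),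
       (List.modifyHead (fun x => cur ++ x) (pvS cs)).getLastD []) := by
  induction cs with
  | nil =>
    intro p cur
    simp [pvS, List.modifyHead]
  | cons c rest ih =>
    intro p cur
    by_cases hc : c = '-'
    · subst hc
      rw [List.foldl_cons, show pvF (p, cur) '-' = (some (pvPrep p cur), []) by simp [pvF]]
      rw [ih (some (pvPrep p cur)) []]
      rw [pv_modifyHead_nil_append]
      have hne := pvS_ne_nil rest
      simp only [pvS, reduceIte]
      have hmod : List.modifyHead (fun x => cur ++ x) ([] :: pvS rest) = cur :: pvS rest := by
        simp [List.modifyHead]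
      rw [hmod]
      have hlen2 : ¬ (([] : List Char) :: pvS rest).length = 1 := by
        cases h : pvS rest with
        | nil => exact absurd h hne
        | cons a t => simp
      rw [Prod.mk.injEq]
      refine ⟨?_, ?_⟩
      · rw [if_neg hlen2]
        by_cases h1 : (pvS rest).length = 1
        · rw [if_pos h1]
          obtain ⟨x, hx⟩ : ∃ x, pvS rest = [x] := by
            cases h : pvS rest with
            | nil => exact absurd h hne
            | cons a t => cases t with
              | nil => exact ⟨a, rfl⟩
              | cons b t' => rw [h] at h1; simp at h1
          rw [hx]
          simp [PySem.Chars.join_singleton]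
        · rw [if_neg h1]
          obtain ⟨a, b, t, hab⟩ : ∃ a b t, pvS rest = a :: b :: t := by
            cases h : pvS rest with
            | nil => exact absurd h hne
            | cons a t => cases t with
              | nil => rw [h] at h1; simp at h1
              | cons b t' => exact ⟨a, b, t', rfl⟩
          rw [hab]
          simp only [List.dropLast]
          rw [show (cur :: a :: (b :: t).dropLast) = cur :: (a :: (b :: t).dropLast) from rfl]
          have : PySem.Chars.join ['-'] (cur :: a :: (b :: t).dropLast)
              = cur ++ '-' :: PySem.Chars.join ['-'] (a :: (b :: t).dropLast) := by
            rw [PySem.Chars.join_cons_cons]; simp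
          rw [this]
          cases p <;> simp [pvPrep]
      · exact (pv_getLastD_cons_of_ne_nil cur (pvS rest) hne).symm
    · rw [List.foldl_cons, show pvF (p, cur) c = (p, cur ++ [c]) by simp [pvF, hc]]
      rw [ih p (cur ++ [c])]
      simp only [pvS, if_neg hc]
      rw [pv_modifyHead_comp cur c (pvS rest)]
      rw [List.length_modifyHead]

-- A's and B's per-string (name, price) computations agree
theorem pv_pair_eq (cs : List Char) :
    ((match (List.foldl pvF (none, []) cs).1 with
      | none => ("" : String)
      | some n => String.ofList (PySem.Chars.strip n)),
     String.ofList (PySem.Chars.strip (List.foldl pvF (none, []) cs).2)) =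
    (String.ofList (PySem.Chars.strip (PySem.Chars.join ['-'] (PySem.List.slice (PySem.Chars.splitOn cs ['-']) (some 0) (some (-1))))),
     String.ofList (PySem.Chars.strip (PySem.List.pyGetD (PySem.Chars.splitOn cs ['-']) (-1) []))) := by
  rw [pv_splitOn_eq_pvS, pv_fold cs none [], pv_modifyHead_nil_append]
  have hne := pvS_ne_nil cs
  rw [PySem.List.slice_zero_start, PySem.List.slice_to_neg_one,
    PySem.List.pyGetD_neg_one _ [] hne, pv_getLast_eq_getLastD _ hne]
  by_cases h1 : (pvS cs).length = 1
  · rw [if_pos h1]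
    obtain ⟨x, hx⟩ : ∃ x, pvS cs = [x] := by
      cases h : pvS cs with
      | nil => exact absurd h hne
      | cons a t => cases t with
        | nil => exact ⟨a, rfl⟩
        | cons b t' => rw [h] at h1; simp at h1
    rw [hx]
    simp [PySem.Chars.join_nil, PySem.Chars.strip, PySem.Chars.lstrip, PySem.Chars.rstrip]
  · rw [if_neg h1]
    simp [pvPrep]

theorem pv_step_eq (d : List (String × String)) : second_nfStep d = second_nfAltStep d := by
  unfold second_nfStep second_nfAltStep
  cases h : (PySem.Dict.mk d).get? "order_details_string" with
  | none => rfl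
  | some product =>
    dsimp only
    have := pv_pair_eq product.toList
    rw [show ((match (List.foldl pvF (none, []) product.toList).1 with
          | none => ("" : String)
          | some n => String.ofList (PySem.Chars.strip n)) : String)
        = (String.ofList (PySem.Chars.strip (PySem.Chars.join ['-'] (PySem.List.slice (PySem.Chars.splitOn product.toList ['-']) (some 0) (some (-1)))))) from congrArg Prod.fst this,
      show String.ofList (PySem.Chars.strip (List.foldl pvF (none, []) product.toList).2)
        = String.ofList (PySem.Chars.strip (PySem.List.pyGetD (PySem.Chars.splitOn product.toList ['-']) (-1) [])) from congrArg Prod.snd this]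

theorem pv_loop_eq (dl : List (List (String × String))) : second_nfLoop dl = second_nfAltLoop dl := by
  induction dl with
  | nil => rfl
  | cons d rest ih => simp [second_nfLoop, second_nfAltLoop, pv_step_eq, ih]

-- ===== VERDICT (by name: the statement is the Claim_ definition above) =====
theorem second_nf_spec : Claim_equal_second_nf := by
  intro dl _ _
  unfold Spec_second_nf second_nf second_nf_alt
  rw [pv_loop_eq]
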